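-- pv_equiv track=rewrite | github.com/T-Sunm/VINLE-GRPO | src/evaluation/core/format_detector.py | validate_format_consistency
-- ===== SOURCE A (Python) =====
-- from typing import Dict, List
--
-- def detect_format(data: List[Dict]) -> Dict[str, bool]:
--     """
--     Auto-detect inference output format.
--
--     Args:
--         data: List of inference result dictionaries
--
--     Returns:
--         Dictionary with format information:
--             - has_thinking: bool
--             - has_pred_explanation: bool
--             - format_name: str (GRPO, OEA, OTA, ZEROSHOT)
--     """
--     if not data or len(data) == 0:
--         return {
--             'has_thinking': False,
--             'has_pred_explanation': False,
--             'format_name': 'UNKNOWN'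
--         }
--
--     sample = data[0]
--
--     has_thinking = bool(sample.get('thinking', '').strip())
--     has_pred_explanation = bool(sample.get('pred_explanation', '').strip())
--
--     # Determine format name
--     if has_thinking and has_pred_explanation:
--         format_name = 'GRPO/ZEROSHOT'
--     elif has_pred_explanation:
--         format_name = 'OEA'
--     elif has_thinking:
--         format_name = 'OTA'
--     else:
--         format_name = 'UNKNOWN'
--
--     return {
--         'has_thinking': has_thinking,
--         'has_pred_explanation': has_pred_explanation,
--         'format_name': format_name
--     }
--
-- def validate_format_consistency(data: List[Dict]) -> bool:
--     """
--     Validate that all samples have consistent format.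
--
--     Args:
--         data: List of inference result dictionaries
--
--     Returns:
--         True if all samples have the same format, False otherwise
--     """
--     if not data:
--         return True
--
--     first_format = detect_format([data[0]])
--
--     for item in data[1:]:
--         item_format = detect_format([item])
--         if (item_format['has_thinking'] != first_format['has_thinking'] or
--             item_format['has_pred_explanation'] != first_format['has_pred_explanation']):
--             return False
--
--     return True
-- ===== SOURCE B (Python) =====
-- def validate_format_consistency(data):
--     sigs = {(bool(d.get('thinking', '').strip()),
--              bool(d.get('pred_explanation', '').strip()))
--             for d in data}
--     return len(sigs) <= 1
-- ===== Notes on version B (the rewrite author's own statement) =====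
-- stated objective: simpler
-- what changed: Replaces the compare-each-item-to-the-first loop with early exit (via detect_format on singleton lists) by a one-expression set comprehension collecting each item's (thinking, pred_explanation) signature and checking the set has at most one element; the empty case needs no guard.
import Mathlib
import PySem

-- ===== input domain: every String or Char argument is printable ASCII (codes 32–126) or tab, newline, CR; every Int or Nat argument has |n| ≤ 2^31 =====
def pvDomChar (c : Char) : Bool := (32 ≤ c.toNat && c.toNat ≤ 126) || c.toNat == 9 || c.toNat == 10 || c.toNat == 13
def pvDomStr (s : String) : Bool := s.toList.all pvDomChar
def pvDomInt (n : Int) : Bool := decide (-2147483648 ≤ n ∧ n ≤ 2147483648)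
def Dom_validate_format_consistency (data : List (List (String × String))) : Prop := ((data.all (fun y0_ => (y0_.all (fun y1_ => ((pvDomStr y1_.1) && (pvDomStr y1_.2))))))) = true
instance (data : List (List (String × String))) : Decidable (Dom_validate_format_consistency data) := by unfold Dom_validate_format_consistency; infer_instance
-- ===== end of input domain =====

-- ===== PORT A =====
-- B is a one-expression set-of-signatures check; same value as A's first-vs-rest loop (objective: simpler).
-- detect_format returns a Python dict with mixed value types (bool, bool, str);
-- ported as the tuple (has_thinking, has_pred_explanation, format_name), step for step.
def detect_format (data : List (List (String × String))) : Bool × Bool × String :=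
  match data with
  | [] => (false, false, "UNKNOWN")
  | sample :: _ =>
    let has_thinking : Bool := PySem.Str.strip (PySem.Dict.getD ⟨sample⟩ "thinking" "") != ""
    let has_pred_explanation : Bool := PySem.Str.strip (PySem.Dict.getD ⟨sample⟩ "pred_explanation" "") != ""
    let format_name : String :=
      if has_thinking && has_pred_explanation then "GRPO/ZEROSHOT"
      else if has_pred_explanation then "OEA"
      else if has_thinking then "OTA"
      else "UNKNOWN"
    (has_thinking, has_pred_explanation, format_name)

-- the 'for item in data[1:]' loop with its early return
def vfcLoop (first : Bool × Bool × String) : List (List (String × String)) → Bool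
  | [] => true
  | item :: rest =>
    let item_format := detect_format [item]
    if item_format.1 != first.1 || item_format.2.1 != first.2.1 then false
    else vfcLoop first rest

def validate_format_consistency (data : List (List (String × String))) : Bool :=
  match data with
  | [] => true
  | d0 :: rest => vfcLoop (detect_format [d0]) rest

-- ===== PORT B =====
-- an item's signature: the (bool(d.get('thinking','').strip()), bool(d.get('pred_explanation','').strip())) tuple
def sigB (d : List (String × String)) : Bool × Bool :=
  (PySem.Str.strip (PySem.Dict.getD ⟨d⟩ "thinking" "") != "",
   PySem.Str.strip (PySem.Dict.getD ⟨d⟩ "pred_explanation" "") != "")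

def validate_format_consistency_alt (data : List (List (String × String))) : Bool :=
  decide (PySem.Set.len (PySem.Set.ofList (data.map sigB)) ≤ 1)

-- ===== PRECONDITION & SPEC =====
def Spec_validate_format_consistency (data : List (List (String × String))) (out : Bool) : Prop := out = validate_format_consistency_alt data
instance (data : List (List (String × String))) (out : Bool) : Decidable (Spec_validate_format_consistency data out) := by unfold Spec_validate_format_consistency; infer_instance

-- ===== CLAIM (what is proved, stated in full; the proofs are below) =====
def Claim_equal_validate_format_consistency : Prop := ∀ (data : List (List (String × String))), Dom_validate_format_consistency data → Spec_validate_format_consistency data (validate_format_consistency data)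

-- ===== LEMMAS AND PROOFS =====

-- a deduplicated list headed by s has at most one element iff every listed element equals s
lemma set_card_le_one {α : Type} [BEq α] [LawfulBEq α] (s : α) (l : List α) :
    PySem.Set.len (PySem.Set.ofList (s :: l)) ≤ 1 ↔ ∀ x ∈ l, x = s := by
  have hmem : ∀ y, y ∈ PySem.Set.ofList (s :: l) ↔ y ∈ s :: l :=
    fun y => PySem.Set.mem_ofList _ _
  have hnd := PySem.Set.nodup_ofList (s :: l)
  simp only [PySem.Set.len]
  set L := PySem.Set.ofList (s :: l) with hL
  clear_value L
  match L, hmem, hnd with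
  | [], hmem, _ => exact absurd ((hmem s).2 (List.mem_cons_self)) (List.not_mem_nil)
  | [a], hmem, _ =>
      have hsa : s = a := by have := (hmem s).2 List.mem_cons_self; simpa using this
      constructor
      · intro _ x hx
        have := (hmem x).2 (List.mem_cons_of_mem _ hx)
        simp [← hsa] at this
        exact this
      · intro _
        norm_num
  | a :: b :: t, hmem, hnd =>
      constructor
      · intro h
        simp at h
        omega
      · intro h
        have hab : a ≠ b := by
          simp only [List.nodup_cons, List.mem_cons] at hnd
          tauto
        have ha := (hmem a).1 List.mem_cons_self
        have hb := (hmem b).1 (List.mem_cons_of_mem _ List.mem_cons_self)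
        have key : ∀ x, x ∈ s :: l → x = s := by
          intro x hx
          rcases List.mem_cons.1 hx with rfl | hx
          · rfl
          · exact h x hx
        exact absurd ((key a ha).trans (key b hb).symm) hab

-- A's loop over data[1:] is an all-check of the signature against the first item's signature
lemma vfcLoop_all (p : Bool × Bool × String) (l : List (List (String × String))) :
    vfcLoop p l = l.all (fun it => sigB it == (p.1, p.2.1)) := by
  induction l with
  | nil => rfl
  | cons item rest ih =>
    rw [vfcLoop, List.all_cons, ih]
    rw [show (detect_format [item]).1 = (sigB item).1 from rfl,
        show (detect_format [item]).2.1 = (sigB item).2 from rfl]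
    cases h1 : (sigB item).1 == p.1 <;> cases h2 : (sigB item).2 == p.2.1 <;>
      simp_all [Prod.ext_iff, bne]

-- ===== VERDICT (by name: the statement is the Claim_ definition above) =====
theorem validate_format_consistency_spec : Claim_equal_validate_format_consistency := by
  intro data _
  unfold Spec_validate_format_consistency
  cases data with
  | nil => rfl
  | cons d0 rest =>
    show vfcLoop (detect_format [d0]) rest = _
    rw [vfcLoop_all, show ((detect_format [d0]).1, (detect_format [d0]).2.1) = sigB d0 from rfl]
    unfold validate_format_consistency_alt
    rw [show (d0 :: rest).map sigB = sigB d0 :: rest.map sigB from rfl, Bool.eq_iff_iff]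
    rw [decide_eq_true_eq, set_card_le_one]
    simp only [List.all_eq_true, List.mem_map, beq_iff_eq, forall_exists_index, and_imp]
    constructor
    · rintro h x it hit rfl
      exact h it hit
    · intro h it hit
      exact h _ it hit rfl
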